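-- pv_equiv track=rewrite | github.com/mtyszler/advent-of-code-2022 | src/functions_day_07.py | find_min_size
-- ===== SOURCE A (Python) =====
-- def find_min_size(sizes: list, total_size: int, need: int) -> int:
--     """
--
--     Args:
--         sizes:
--         total_size:
--         need:
--
--     Returns:
--
--     """
--
--     free_space = total_size - max(sizes)
--     required = need - free_space
--     sorted_sizes = sorted(sizes)
--
--     for i in sorted_sizes:
--         if i > required:
--             return i
--         else:
--             pass
--
--     raise ValueError('no value found')
-- ===== SOURCE B (Python) =====
-- def find_min_size(sizes: list, total_size: int, need: int) -> int:
--     """Single pass, no sort: the answer is the minimum of the sizes strictly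
--     greater than the required amount."""
--     required = need - (total_size - max(sizes))
--     return min(i for i in sizes if i > required)
-- ===== Notes on version B (the rewrite author's own statement) =====
-- stated objective: simpler
-- what changed: B drops the sort-then-linear-scan entirely and returns min(i for i in sizes if i > required) in one filtering pass; Pre_ excludes exactly the inputs where A raises ValueError (empty sizes, or no size above the required amount), where B raises ValueError too.
import Mathlib
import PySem

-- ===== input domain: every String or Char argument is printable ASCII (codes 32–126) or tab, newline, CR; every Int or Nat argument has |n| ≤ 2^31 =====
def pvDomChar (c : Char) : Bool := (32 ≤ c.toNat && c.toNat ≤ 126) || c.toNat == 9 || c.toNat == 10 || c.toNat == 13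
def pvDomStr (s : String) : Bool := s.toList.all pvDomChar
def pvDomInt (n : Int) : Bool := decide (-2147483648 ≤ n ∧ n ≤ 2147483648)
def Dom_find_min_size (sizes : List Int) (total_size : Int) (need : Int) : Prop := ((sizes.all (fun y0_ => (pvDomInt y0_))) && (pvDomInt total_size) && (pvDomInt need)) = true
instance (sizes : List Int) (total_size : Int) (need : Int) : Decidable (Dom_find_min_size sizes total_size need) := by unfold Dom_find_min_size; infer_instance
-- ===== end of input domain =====

-- B replaces A's sort-then-linear-scan by a single filtering pass returning the minimum
-- of the sizes strictly greater than the required amount (simpler, no sort).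


-- ===== PORT A =====
-- the 'for i in sorted_sizes: if i > required: return i' loop
def pvScanA (l : List Int) (required : Int) : Option Int :=
  match l with
  | [] => none
  | i :: t => if required < i then some i else pvScanA t required

def find_min_size (sizes : List Int) (total_size : Int) (need : Int) : Int :=
  match PySem.List.max? sizes (fun x => x) with
  | none => 0  -- max([]) raises ValueError; outside Pre_
  | some m =>
    let free_space := total_size - m
    let required := need - free_space
    let sorted_sizes := PySem.List.sorted sizes (fun x => x)
    match pvScanA sorted_sizes required with
    | some i => i
    | none => 0  -- raise ValueError('no value found'); outside Pre_

-- ===== PORT B =====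
def find_min_size_alt (sizes : List Int) (total_size : Int) (need : Int) : Int :=
  match PySem.List.max? sizes (fun x => x) with
  | none => 0  -- max([]) raises ValueError; outside Pre_
  | some m =>
    let required := need - (total_size - m)
    match PySem.List.min? (sizes.filter (fun i => required < i)) (fun x => x) with
    | some v => v
    | none => 0  -- min() of empty generator raises ValueError; outside Pre_

-- ===== PRECONDITION & SPEC =====
-- Pre_ excludes exactly the inputs where A raises ValueError: empty sizes (max([]))
-- and lists with no element strictly greater than need - (total_size - max(sizes)).
def Pre_find_min_size (sizes : List Int) (total_size : Int) (need : Int) : Prop :=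
  sizes ≠ [] ∧ ∃ i ∈ sizes, need - (total_size - sizes.foldl max (sizes.headD 0)) < i
instance (sizes : List Int) (total_size : Int) (need : Int) : Decidable (Pre_find_min_size sizes total_size need) := by unfold Pre_find_min_size; infer_instance
def pvWitness_find_min_size : List Int × Int × Int := ([1, 5], 10, 3)

def Spec_find_min_size (sizes : List Int) (total_size : Int) (need : Int) (out : Int) : Prop := out = find_min_size_alt sizes total_size need
instance (sizes : List Int) (total_size : Int) (need : Int) (out : Int) : Decidable (Spec_find_min_size sizes total_size need out) := by unfold Spec_find_min_size; infer_instance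

-- ===== CLAIM (what is proved, stated in full; the proofs are below) =====
def Claim_equal_find_min_size : Prop := ∀ (sizes : List Int) (total_size : Int) (need : Int), Dom_find_min_size sizes total_size need → Pre_find_min_size sizes total_size need → Spec_find_min_size sizes total_size need (find_min_size sizes total_size need)

-- ===== LEMMAS AND PROOFS =====

-- A's scan is 'head of the filtered list'
theorem pvScanA_eq_head_filter (l : List Int) (r : Int) :
    pvScanA l r = (l.filter (fun i => decide (r < i))).head? := by
  induction l with
  | nil => rfl
  | cons x t ih =>
    by_cases h : r < x
    · simp [pvScanA, h]
    · simp [pvScanA, h, ih]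

theorem pvScanA_sorted_eq_min (sizes : List Int) (r : Int) :
    pvScanA (PySem.List.sorted sizes (fun x => x)) r
      = PySem.List.min? (sizes.filter (fun i => decide (r < i))) (fun x => x) := by
  rw [pvScanA_eq_head_filter]
  have hperm : ((PySem.List.sorted sizes (fun x => x)).filter (fun i => decide (r < i))).Perm
      (sizes.filter (fun i => decide (r < i))) :=
    (PySem.List.sorted_perm sizes (fun x => x) false).filter _
  have hpair : ((PySem.List.sorted sizes (fun x => x)).filter (fun i => decide (r < i))).Pairwise
      (fun a b => a ≤ b) :=
    (PySem.List.sorted_pairwise sizes (fun x => x)).filter _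
  cases hF : (PySem.List.sorted sizes (fun x => x)).filter (fun i => decide (r < i)) with
  | nil =>
    have : sizes.filter (fun i => decide (r < i)) = [] := by
      have := hperm; rw [hF] at this; exact this.nil_eq.symm
    rw [this]
    simp [PySem.List.min?]
  | cons h t =>
    rw [hF] at hperm hpair
    cases hG : PySem.List.min? (sizes.filter (fun i => decide (r < i))) (fun x => x) with
    | none =>
      rw [PySem.List.min?_eq_none_iff] at hG
      rw [hG] at hperm
      exact absurd hperm.eq_nil (by simp)
    | some m =>
      have hmG : m ∈ sizes.filter (fun i => decide (r < i)) := PySem.List.min?_mem hG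
      have hmF : m ∈ h :: t := hperm.mem_iff.mpr hmG
      have hhm : h ≤ m := by
        rcases List.mem_cons.mp hmF with h1 | h1
        · omega
        · exact (List.pairwise_cons.mp hpair).1 m h1
      have hmh : m ≤ h := PySem.List.min?_isMin hG h (hperm.mem_iff.mp (List.mem_cons_self))
      simp [le_antisymm hhm hmh]

theorem find_min_size_spec : Claim_equal_find_min_size := by
  intro sizes total_size need _ hpre
  obtain ⟨hne, i, hi, hlt⟩ := hpre
  cases sizes with
  | nil => exact absurd rfl hne
  | cons x t =>
  have hM : List.foldl max ((x :: t).headD 0) (x :: t) = List.foldl max x t := by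
    simp [List.foldl]
  rw [hM] at hlt
  unfold Spec_find_min_size find_min_size find_min_size_alt
  rw [PySem.List.max?_id_cons]
  have hscan := pvScanA_sorted_eq_min (x :: t) (need - (total_size - t.foldl max x))
  have hfil : i ∈ (x :: t).filter
      (fun j => decide (need - (total_size - t.foldl max x) < j)) := by
    rw [List.mem_filter]
    exact ⟨hi, decide_eq_true hlt⟩
  cases hG : PySem.List.min? ((x :: t).filter
      (fun j => decide (need - (total_size - t.foldl max x) < j))) (fun y => y) with
  | none =>
    rw [PySem.List.min?_eq_none_iff] at hG
    rw [hG] at hfil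
    exact absurd hfil (List.not_mem_nil)
  | some m =>
    rw [hG] at hscan
    simp only [hscan, hG]
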